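-- pv_equiv track=rewrite | github.com/viniciusjorgepereira/turing-machine-emulator | turing_machine_structured_english.py | get_statuses
-- ===== SOURCE A (Python) =====
-- def get_statuses(commands):
--     """
--     It returns the statuses after to know the commands
--
--     :param commands: Commands to turing machine
--
--     :return: The statuses of turing machine based on the comands
--     """
--
--     statuses = {}
--
--     for com in commands:
--         statuses[com[0]] = {}
--
--     for com in commands:
--         statuses[com[0]]['mov'] = {}
--
--     for com in commands:
--         statuses[com[0]]['mov'][com[1]] = {}
--
--     for com in commands:
--         statuses[com[0]]['mov'][com[1]][com[2]] = {com[3]: com[4]}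
--
--     return statuses
-- ===== SOURCE B (Python) =====
-- def get_statuses(commands):
--     """Group-by re-implementation: build each state's nested dict in one
--     grouped construction instead of four sequential mutation passes."""
--     statuses = {}
--     for state in dict.fromkeys(c[0] for c in commands):
--         group = [c for c in commands if c[0] == state]
--         inner = {}
--         for read in dict.fromkeys(c[1] for c in group):
--             trans = {}
--             for c in group:
--                 if c[1] == read:
--                     trans[c[2]] = {c[3]: c[4]}
--             inner[read] = trans
--         statuses[state] = {'mov': inner}
--     return statuses
-- ===== Notes on version B (the rewrite author's own statement) =====
-- stated objective: alternative
-- what changed: Replaces A's four sequential dict-mutation passes with a group-by construction: states and read-symbols are deduplicated in first-occurrence order and each nested level is built once from the filtered command group.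
import Mathlib
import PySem

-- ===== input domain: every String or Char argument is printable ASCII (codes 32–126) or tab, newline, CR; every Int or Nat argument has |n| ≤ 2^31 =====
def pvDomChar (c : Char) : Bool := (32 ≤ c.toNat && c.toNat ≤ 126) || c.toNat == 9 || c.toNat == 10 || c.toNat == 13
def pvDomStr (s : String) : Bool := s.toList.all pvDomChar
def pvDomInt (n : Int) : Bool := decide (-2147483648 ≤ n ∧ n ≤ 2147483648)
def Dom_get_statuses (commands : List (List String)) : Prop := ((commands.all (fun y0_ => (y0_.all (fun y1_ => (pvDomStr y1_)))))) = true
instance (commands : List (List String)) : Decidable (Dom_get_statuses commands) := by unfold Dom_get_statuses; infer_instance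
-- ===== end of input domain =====

-- B replaces A's four sequential dict-mutation passes with a group-by construction
-- (dedup the states / read symbols in first-occurrence order, build each nested level
-- once from the filtered command group); objective: alternative (not claimed faster).

-- Nested dict types (dicts become association lists at the return boundary)
abbrev TMLeaf := PySem.Dict String String
abbrev TM2 := PySem.Dict String TMLeaf
abbrev TM3 := PySem.Dict String TM2
abbrev TM4 := PySem.Dict String TM3
abbrev TM5 := PySem.Dict String TM4

-- com[i] under Pre_ (all commands have ≥ 5 fields, so indexing is in range)
def pvGetS (c : List String) (i : Int) : String := PySem.List.pyGetD c i ""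

-- type-convention coercion: nested Dict → nested association lists (shared by both ports)
def flatTM2 (d : TM2) : List (String × List (String × String)) :=
  d.items.map (fun p => (p.1, p.2.items))
def flatTM3 (d : TM3) : List (String × List (String × List (String × String))) :=
  d.items.map (fun p => (p.1, flatTM2 p.2))
def flatTM4 (d : TM4) : List (String × List (String × List (String × List (String × String)))) :=
  d.items.map (fun p => (p.1, flatTM3 p.2))
def flatTM5 (d : TM5) : List (String × List (String × List (String × List (String × List (String × String))))) :=
  d.items.map (fun p => (p.1, flatTM4 p.2))

-- ===== PORT A =====
-- A's four sequential loops over commands, one pass per nesting level.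
def aPass1 (commands : List (List String)) : TM5 :=
  commands.foldl (fun st com => st.insert (pvGetS com 0) PySem.Dict.empty) PySem.Dict.empty
def aPass2 (commands : List (List String)) : TM5 :=
  commands.foldl (fun st com => st.modify (pvGetS com 0) PySem.Dict.empty
    (fun d => d.insert "mov" PySem.Dict.empty)) (aPass1 commands)
def aPass3 (commands : List (List String)) : TM5 :=
  commands.foldl (fun st com => st.modify (pvGetS com 0) PySem.Dict.empty
    (fun d => d.modify "mov" PySem.Dict.empty
      (fun m => m.insert (pvGetS com 1) PySem.Dict.empty))) (aPass2 commands)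
def aPass4 (commands : List (List String)) : TM5 :=
  commands.foldl (fun st com => st.modify (pvGetS com 0) PySem.Dict.empty
    (fun d => d.modify "mov" PySem.Dict.empty
      (fun m => m.modify (pvGetS com 1) PySem.Dict.empty
        (fun t => t.insert (pvGetS com 2)
          ((PySem.Dict.empty : TMLeaf).insert (pvGetS com 3) (pvGetS com 4)))))) (aPass3 commands)

def get_statuses (commands : List (List String)) : List (String × List (String × List (String × List (String × List (String × String))))) :=
  flatTM5 (aPass4 commands)

-- ===== PORT B =====
-- group = [c for c in commands if c[0] == state]
def tmGroup (commands : List (List String)) (state : String) : List (List String) :=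
  commands.filter (fun c => pvGetS c 0 == state)

-- trans = {} ; for c in group: if c[1] == read: trans[c[2]] = {c[3]: c[4]}
def transFor (group : List (List String)) (read : String) : TM2 :=
  group.foldl (fun t c =>
    if pvGetS c 1 == read then
      t.insert (pvGetS c 2) ((PySem.Dict.empty : TMLeaf).insert (pvGetS c 3) (pvGetS c 4))
    else t) PySem.Dict.empty

-- inner = {} ; for read in dict.fromkeys(c[1] for c in group): inner[read] = trans
def innerFor (group : List (List String)) : TM3 :=
  (PySem.List.dedup (group.map (fun c => pvGetS c 1))).foldl
    (fun inner read => inner.insert read (transFor group read)) PySem.Dict.empty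

def get_statuses_alt (commands : List (List String)) : List (String × List (String × List (String × List (String × List (String × String))))) :=
  flatTM5 ((PySem.List.dedup (commands.map (fun c => pvGetS c 0))).foldl
    (fun res state => res.insert state
      ((PySem.Dict.empty : TM4).insert "mov" (innerFor (tmGroup commands state))))
    PySem.Dict.empty)

-- ===== PRECONDITION & SPEC =====
-- Pre_ excludes exactly the inputs where Python A raises IndexError: a command with
-- fewer than 5 fields (A indexes com[0]..com[4]).
def Pre_get_statuses (commands : List (List String)) : Prop :=
  ∀ com ∈ commands, 5 ≤ com.length
instance (commands : List (List String)) : Decidable (Pre_get_statuses commands) := by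
  unfold Pre_get_statuses; infer_instance

def pvWitness_get_statuses : List (List String) :=
  [["q0", "a", "b", "R", "q1"], ["q0", "b", "a", "L", "q0"], ["q1", "a", "a", "R", "q1"]]

def Spec_get_statuses (commands : List (List String)) (out : List (String × List (String × List (String × List (String × List (String × String)))))) : Prop := out = get_statuses_alt commands
instance (commands : List (List String)) (out : List (String × List (String × List (String × List (String × List (String × String)))))) : Decidable (Spec_get_statuses commands out) := by
  unfold Spec_get_statuses
  letI i1 : DecidableEq (List (String × String)) := inferInstance
  letI i2 : DecidableEq (List (String × List (String × String))) := inferInstance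
  letI i3 : DecidableEq (List (String × List (String × List (String × String)))) := inferInstance
  letI i4 : DecidableEq (List (String × List (String × List (String × List (String × String))))) := inferInstance
  infer_instance

-- ===== CLAIM (what is proved, stated in full; the proofs are below) =====
def Claim_equal_get_statuses : Prop := ∀ (commands : List (List String)), Dom_get_statuses commands → Pre_get_statuses commands → Spec_get_statuses commands (get_statuses commands)

-- ===== LEMMAS AND PROOFS =====

-- value of a keyed modify-loop at one key: the loop restricted to that key's group
lemma getD_foldl_modify_keyed {ν β : Type} (l : List β) (key : β → String) (d0 : ν)
    (f : β → ν → ν) (k : String) (st : PySem.Dict String ν) :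
    (l.foldl (fun st x => st.modify (key x) d0 (f x)) st).getD k d0
      = (l.filter (fun x => key x == k)).foldl (fun v x => f x v) (st.getD k d0) := by
  induction l generalizing st with
  | nil => rfl
  | cons x xs ih =>
      simp only [List.foldl_cons, List.filter_cons]
      by_cases h : key x = k
      · simp only [h, beq_self_eq_true, if_true, List.foldl_cons]
        rw [ih, PySem.Dict.getD_modify]
        simp [h]
      · have hb : (key x == k) = false := by simp [h]
        simp only [hb, if_false]
        rw [ih, PySem.Dict.getD_modify]
        simp [Ne.symm h]

-- same for a keyed insert-loop
lemma getD_foldl_insert_keyed {ν β : Type} (l : List β) (key : β → String) (g : β → ν)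
    (d0 : ν) (k : String) (st : PySem.Dict String ν) :
    (l.foldl (fun st x => st.insert (key x) (g x)) st).getD k d0
      = (l.filter (fun x => key x == k)).foldl (fun _ x => g x) (st.getD k d0) := by
  induction l generalizing st with
  | nil => rfl
  | cons x xs ih =>
      simp only [List.foldl_cons, List.filter_cons]
      by_cases h : key x = k
      · simp only [h, beq_self_eq_true, if_true, List.foldl_cons]
        rw [ih, PySem.Dict.getD_insert]
        simp [h]
      · have hb : (key x == k) = false := by simp [h]
        simp only [hb, if_false]
        rw [ih, PySem.Dict.getD_insert]
        simp [Ne.symm h]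

lemma foldl_const_self {ν β : Type} (l : List β) (b : ν) :
    l.foldl (fun _ _ => b) b = b := by
  induction l with
  | nil => rfl
  | cons x xs ih => simpa using ih

lemma set_update_of_subset (s xs : List String) (h : ∀ x ∈ xs, x ∈ s) :
    PySem.Set.update s xs = s := by
  rw [PySem.Set.update_eq_append_filter]
  have hf : (PySem.Set.ofList xs).filter (fun y => !PySem.Set.contains s y) = [] := by
    rw [List.filter_eq_nil_iff]
    intro y hy
    have hmem : y ∈ s := h y ((PySem.Set.mem_ofList xs y).1 hy)
    simp [PySem.Set.contains, hmem]
  rw [hf, List.append_nil]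

lemma eq_singleton_of_nodup_mem (s : List String) (a : String) (hn : s.Nodup)
    (hm : ∀ y, y ∈ s ↔ y = a) : s = [a] := by
  cases s with
  | nil => exact absurd ((hm a).2 rfl) List.not_mem_nil
  | cons y ys =>
      have hy : y = a := (hm y).1 List.mem_cons_self
      cases ys with
      | nil => rw [hy]
      | cons z zs =>
          have hz : z = a := (hm z).1 (List.mem_cons_of_mem _ List.mem_cons_self)
          have hyz : y ∉ z :: zs := (List.nodup_cons.1 hn).1
          exact absurd (by rw [hz, ← hy]; exact List.mem_cons_self) hyz

lemma ofList_map_const_ne_nil {β : Type} (l : List β) (a : String) (h : l ≠ []) :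
    PySem.Set.ofList (l.map (fun _ => a)) = [a] := by
  apply eq_singleton_of_nodup_mem _ _ (PySem.Set.nodup_ofList _)
  intro y
  rw [PySem.Set.mem_ofList]
  constructor
  · intro hy
    rcases List.mem_map.1 hy with ⟨x, _, rfl⟩
    rfl
  · rintro rfl
    cases l with
    | nil => exact absurd rfl h
    | cons x xs => exact List.mem_map.2 ⟨x, List.mem_cons_self, rfl⟩

-- ---- A's passes, projected at one state key ----

def pMov3 (g : List (List String)) : TM3 :=
  g.foldl (fun m com => m.insert (pvGetS com 1) PySem.Dict.empty) PySem.Dict.empty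
def pMov4 (g : List (List String)) : TM3 :=
  g.foldl (fun m com => m.modify (pvGetS com 1) PySem.Dict.empty
    (fun t => t.insert (pvGetS com 2)
      ((PySem.Dict.empty : TMLeaf).insert (pvGetS com 3) (pvGetS com 4)))) (pMov3 g)
def pD2 (g : List (List String)) : TM4 :=
  g.foldl (fun d _ => d.insert "mov" PySem.Dict.empty) PySem.Dict.empty
def pD3 (g : List (List String)) : TM4 :=
  g.foldl (fun d com => d.modify "mov" PySem.Dict.empty
    (fun m => m.insert (pvGetS com 1) PySem.Dict.empty)) (pD2 g)
def pD4 (g : List (List String)) : TM4 :=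
  g.foldl (fun d com => d.modify "mov" PySem.Dict.empty
    (fun m => m.modify (pvGetS com 1) PySem.Dict.empty
      (fun t => t.insert (pvGetS com 2)
        ((PySem.Dict.empty : TMLeaf).insert (pvGetS com 3) (pvGetS com 4))))) (pD3 g)

lemma pass1_getD (commands : List (List String)) (k : String) :
    (aPass1 commands).getD k PySem.Dict.empty = PySem.Dict.empty := by
  have h := getD_foldl_insert_keyed commands (fun c => pvGetS c 0)
    (fun _ => (PySem.Dict.empty : TM4)) PySem.Dict.empty k PySem.Dict.empty
  refine h.trans ?_
  simpa using foldl_const_self (commands.filter (fun c => pvGetS c 0 == k)) (PySem.Dict.empty : TM4)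

lemma pass2_getD (commands : List (List String)) (k : String) :
    (aPass2 commands).getD k PySem.Dict.empty = pD2 (tmGroup commands k) := by
  have h := getD_foldl_modify_keyed commands (fun c => pvGetS c 0) PySem.Dict.empty
    (fun _com d => d.insert "mov" PySem.Dict.empty) k (aPass1 commands)
  refine h.trans ?_
  rw [pass1_getD]
  rfl

lemma pass3_getD (commands : List (List String)) (k : String) :
    (aPass3 commands).getD k PySem.Dict.empty = pD3 (tmGroup commands k) := by
  have h := getD_foldl_modify_keyed commands (fun c => pvGetS c 0) PySem.Dict.empty
    (fun com d => d.modify "mov" PySem.Dict.empty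
      (fun m => m.insert (pvGetS com 1) PySem.Dict.empty)) k (aPass2 commands)
  refine h.trans ?_
  rw [pass2_getD]
  rfl

lemma pass4_getD (commands : List (List String)) (k : String) :
    (aPass4 commands).getD k PySem.Dict.empty = pD4 (tmGroup commands k) := by
  have h := getD_foldl_modify_keyed commands (fun c => pvGetS c 0) PySem.Dict.empty
    (fun com d => d.modify "mov" PySem.Dict.empty
      (fun m => m.modify (pvGetS com 1) PySem.Dict.empty
        (fun t => t.insert (pvGetS com 2)
          ((PySem.Dict.empty : TMLeaf).insert (pvGetS com 3) (pvGetS com 4))))) k (aPass3 commands)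
  refine h.trans ?_
  rw [pass3_getD]
  rfl

-- ---- the per-state dicts ----

lemma pD2_mov (g : List (List String)) :
    (pD2 g).getD "mov" PySem.Dict.empty = PySem.Dict.empty := by
  have h := getD_foldl_insert_keyed g (fun _ => ("mov" : String))
    (fun _ => (PySem.Dict.empty : TM3)) PySem.Dict.empty "mov" PySem.Dict.empty
  refine h.trans ?_
  simpa using foldl_const_self (g.filter (fun _ => ("mov" : String) == "mov")) (PySem.Dict.empty : TM3)

lemma pD3_mov (g : List (List String)) :
    (pD3 g).getD "mov" PySem.Dict.empty = pMov3 g := by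
  have h := getD_foldl_modify_keyed g (fun _ => ("mov" : String)) PySem.Dict.empty
    (fun com m => m.insert (pvGetS com 1) PySem.Dict.empty) "mov" (pD2 g)
  refine h.trans ?_
  rw [pD2_mov]
  simp [pMov3]

lemma pD4_mov (g : List (List String)) :
    (pD4 g).getD "mov" PySem.Dict.empty = pMov4 g := by
  have h := getD_foldl_modify_keyed g (fun _ => ("mov" : String)) PySem.Dict.empty
    (fun com m => m.modify (pvGetS com 1) PySem.Dict.empty
      (fun t => t.insert (pvGetS com 2)
        ((PySem.Dict.empty : TMLeaf).insert (pvGetS com 3) (pvGetS com 4)))) "mov" (pD3 g)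
  refine h.trans ?_
  rw [pD3_mov]
  simp [pMov4]

lemma pMov3_getD (g : List (List String)) (k : String) :
    (pMov3 g).getD k PySem.Dict.empty = PySem.Dict.empty := by
  have h := getD_foldl_insert_keyed g (fun c => pvGetS c 1)
    (fun _ => (PySem.Dict.empty : TM2)) PySem.Dict.empty k PySem.Dict.empty
  refine h.trans ?_
  simpa using foldl_const_self (g.filter (fun c => pvGetS c 1 == k)) (PySem.Dict.empty : TM2)

lemma pMov3_keys (g : List (List String)) :
    (pMov3 g).keys = PySem.Set.ofList (g.map (fun c => pvGetS c 1)) := by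
  have h := PySem.Dict.keys_foldl_insert_key g (fun c => pvGetS c 1)
    (fun _ _ => (PySem.Dict.empty : TM2)) PySem.Dict.empty
  refine h.trans ?_
  simp [PySem.Set.update_nil_left]

lemma pMov4_keys (g : List (List String)) :
    (pMov4 g).keys = PySem.Set.ofList (g.map (fun c => pvGetS c 1)) := by
  have h := PySem.Dict.keys_foldl_modify_key g (fun c => pvGetS c 1) PySem.Dict.empty
    (fun _ com t => t.insert (pvGetS com 2)
      ((PySem.Dict.empty : TMLeaf).insert (pvGetS com 3) (pvGetS com 4))) (pMov3 g)
  refine h.trans ?_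
  rw [pMov3_keys]
  exact set_update_of_subset _ _ (fun x hx => (PySem.Set.mem_ofList _ _).2 hx)

lemma pMov4_getD (g : List (List String)) (k : String) :
    (pMov4 g).getD k PySem.Dict.empty = transFor g k := by
  have h := getD_foldl_modify_keyed g (fun c => pvGetS c 1) PySem.Dict.empty
    (fun com t => t.insert (pvGetS com 2)
      ((PySem.Dict.empty : TMLeaf).insert (pvGetS com 3) (pvGetS com 4))) k (pMov3 g)
  refine h.trans ?_
  rw [pMov3_getD, transFor, List.foldl_filter]

lemma pMov4_eq_inner (g : List (List String)) : pMov4 g = innerFor g := by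
  apply PySem.Dict.ext
  have hk := pMov4_keys g
  have hnd : (pMov4 g).keys.Nodup := by rw [hk]; exact PySem.Set.nodup_ofList _
  rw [PySem.Dict.items_eq_map_keys _ hnd PySem.Dict.empty, hk]
  have hfresh := PySem.Dict.items_foldl_insert_fresh
    (PySem.List.dedup (g.map (fun c => pvGetS c 1))) (fun r => r) (fun r => transFor g r)
    (PySem.Dict.empty : TM3)
    (by intro a _; exact PySem.Dict.contains_empty _)
    (by simpa using PySem.Set.nodup_ofList (g.map (fun c => pvGetS c 1)))
  rw [innerFor, hfresh, show (PySem.Dict.empty : TM3).items = [] from rfl, List.nil_append]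
  exact List.map_congr_left (fun k _ => by rw [pMov4_getD])

lemma pD2_keys (g : List (List String)) (hg : g ≠ []) : (pD2 g).keys = ["mov"] := by
  have h := PySem.Dict.keys_foldl_insert_key g (fun _ => ("mov" : String))
    (fun _ _ => (PySem.Dict.empty : TM3)) PySem.Dict.empty
  refine h.trans ?_
  rw [PySem.Dict.keys_empty, PySem.Set.update_nil_left]
  exact ofList_map_const_ne_nil g "mov" hg

lemma mem_map_const {β : Type} (g : List β) (x : String) (hx : x ∈ g.map (fun _ => ("mov" : String))) :
    x ∈ ["mov"] := by
  rcases List.mem_map.1 hx with ⟨_, _, rfl⟩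
  exact List.mem_cons_self

lemma pD3_keys (g : List (List String)) (hg : g ≠ []) : (pD3 g).keys = ["mov"] := by
  have h := PySem.Dict.keys_foldl_modify_key g (fun _ => ("mov" : String)) PySem.Dict.empty
    (fun _ com m => m.insert (pvGetS com 1) PySem.Dict.empty) (pD2 g)
  refine h.trans ?_
  rw [pD2_keys g hg]
  exact set_update_of_subset _ _ (mem_map_const g)

lemma pD4_keys (g : List (List String)) (hg : g ≠ []) : (pD4 g).keys = ["mov"] := by
  have h := PySem.Dict.keys_foldl_modify_key g (fun _ => ("mov" : String)) PySem.Dict.empty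
    (fun _ com m => m.modify (pvGetS com 1) PySem.Dict.empty
      (fun t => t.insert (pvGetS com 2)
        ((PySem.Dict.empty : TMLeaf).insert (pvGetS com 3) (pvGetS com 4)))) (pD3 g)
  refine h.trans ?_
  rw [pD3_keys g hg]
  exact set_update_of_subset _ _ (mem_map_const g)

lemma pD4_eq (g : List (List String)) (hg : g ≠ []) :
    pD4 g = (PySem.Dict.empty : TM4).insert "mov" (innerFor g) := by
  apply PySem.Dict.ext
  have hk := pD4_keys g hg
  have hnd : (pD4 g).keys.Nodup := by rw [hk]; exact List.nodup_singleton _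
  rw [PySem.Dict.items_eq_map_keys _ hnd PySem.Dict.empty, hk]
  simp only [List.map_cons, List.map_nil]
  rw [pD4_mov, pMov4_eq_inner]
  rfl

lemma aPass1_keys (commands : List (List String)) :
    (aPass1 commands).keys = PySem.Set.ofList (commands.map (fun c => pvGetS c 0)) := by
  have h := PySem.Dict.keys_foldl_insert_key commands (fun c => pvGetS c 0)
    (fun _ _ => (PySem.Dict.empty : TM4)) PySem.Dict.empty
  refine h.trans ?_
  simp [PySem.Set.update_nil_left]

lemma aPass4_keys (commands : List (List String)) :
    (aPass4 commands).keys = PySem.Set.ofList (commands.map (fun c => pvGetS c 0)) := by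
  have hsub : ∀ x ∈ commands.map (fun c => pvGetS c 0),
      x ∈ PySem.Set.ofList (commands.map (fun c => pvGetS c 0)) :=
    fun x hx => (PySem.Set.mem_ofList _ _).2 hx
  have h2 := PySem.Dict.keys_foldl_modify_key commands (fun c => pvGetS c 0) PySem.Dict.empty
    (fun _ com d => d.insert "mov" PySem.Dict.empty) (aPass1 commands)
  have h3 := PySem.Dict.keys_foldl_modify_key commands (fun c => pvGetS c 0) PySem.Dict.empty
    (fun _ com d => d.modify "mov" PySem.Dict.empty
      (fun m => m.insert (pvGetS com 1) PySem.Dict.empty)) (aPass2 commands)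
  have h4 := PySem.Dict.keys_foldl_modify_key commands (fun c => pvGetS c 0) PySem.Dict.empty
    (fun _ com d => d.modify "mov" PySem.Dict.empty
      (fun m => m.modify (pvGetS com 1) PySem.Dict.empty
        (fun t => t.insert (pvGetS com 2)
          ((PySem.Dict.empty : TMLeaf).insert (pvGetS com 3) (pvGetS com 4))))) (aPass3 commands)
  have k2 : (aPass2 commands).keys = PySem.Set.ofList (commands.map (fun c => pvGetS c 0)) := by
    refine h2.trans ?_
    rw [aPass1_keys]
    exact set_update_of_subset _ _ hsub
  have k3 : (aPass3 commands).keys = PySem.Set.ofList (commands.map (fun c => pvGetS c 0)) := by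
    refine h3.trans ?_
    rw [k2]
    exact set_update_of_subset _ _ hsub
  refine h4.trans ?_
  rw [k3]
  exact set_update_of_subset _ _ hsub

lemma tmGroup_ne_nil (commands : List (List String)) (c0 : String)
    (h : c0 ∈ commands.map (fun c => pvGetS c 0)) : tmGroup commands c0 ≠ [] := by
  rcases List.mem_map.1 h with ⟨c, hc, rfl⟩
  have : c ∈ tmGroup commands (pvGetS c 0) :=
    List.mem_filter.2 ⟨hc, by simp⟩
  intro hnil
  rw [hnil] at this
  exact List.not_mem_nil this

lemma main_dict_eq (commands : List (List String)) :
    aPass4 commands = (PySem.List.dedup (commands.map (fun c => pvGetS c 0))).foldl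
      (fun res state => res.insert state
        ((PySem.Dict.empty : TM4).insert "mov" (innerFor (tmGroup commands state))))
      PySem.Dict.empty := by
  apply PySem.Dict.ext
  have hk := aPass4_keys commands
  have hnd : (aPass4 commands).keys.Nodup := by rw [hk]; exact PySem.Set.nodup_ofList _
  rw [PySem.Dict.items_eq_map_keys _ hnd PySem.Dict.empty, hk]
  have hfresh := PySem.Dict.items_foldl_insert_fresh
    (PySem.List.dedup (commands.map (fun c => pvGetS c 0))) (fun s => s)
    (fun s => (PySem.Dict.empty : TM4).insert "mov" (innerFor (tmGroup commands s)))
    (PySem.Dict.empty : TM5)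
    (by intro a _; exact PySem.Dict.contains_empty _)
    (by simpa using PySem.Set.nodup_ofList (commands.map (fun c => pvGetS c 0)))
  rw [hfresh, show (PySem.Dict.empty : TM5).items = [] from rfl, List.nil_append]
  refine List.map_congr_left (fun c0 hc0 => ?_)
  have hmem : c0 ∈ commands.map (fun c => pvGetS c 0) := by
    have : c0 ∈ PySem.Set.ofList (commands.map (fun c => pvGetS c 0)) := hc0
    exact (PySem.Set.mem_ofList _ _).1 this
  rw [pass4_getD, pD4_eq _ (tmGroup_ne_nil commands c0 hmem)]

-- ===== VERDICT (by name: the statement is the Claim_ definition above) =====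
theorem get_statuses_spec : Claim_equal_get_statuses := by
  intro commands _ _
  unfold Spec_get_statuses get_statuses get_statuses_alt
  rw [main_dict_eq]
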